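-- pv_equiv track=rewrite | github.com/databio/pypiper | pypiper/utils.py | split_by_pipes
-- ===== SOURCE A (Python) =====
-- def split_by_pipes(cmd):
--     """Split the command by shell pipes, but preserve contents in parentheses and braces.
--
--     Also handles nested parens and braces.
--
--     Args:
--         cmd: Command to investigate.
--
--     Returns:
--         List of sub commands to be linked.
--     """
--
--     # Build a simple finite state machine to split on pipes, while
--     # handling nested braces or parentheses.
--     stack_brace = []
--     stack_paren = []
--     cmdlist = []
--     newcmd = str()
--     for char in cmd:
--         if char == "{":
--             stack_brace.append("{")
--         elif char == "}":
--             stack_brace.pop()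
--         elif char == "(":
--             stack_paren.append("(")
--         elif char == ")":
--             stack_paren.pop()
--
--         if len(stack_brace) > 0 or len(stack_paren) > 0:
--             # We are inside a parenthetic of some kind; emit character
--             # no matter what it is
--             newcmd += char
--         elif char == "|":
--             # if it's a pipe, finish the command and start a new one
--             cmdlist.append(newcmd)
--             newcmd = str()
--             next
--         else:
--             # otherwise, emit character.
--             newcmd += char
--
--     # collect the final command before returning
--     cmdlist.append(newcmd)
--     return cmdlist
-- ===== SOURCE B (Python) =====
-- def split_by_pipes(cmd):
--     """Split the command by shell pipes, preserving parenthesized/braced contents."""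
--     # Phase 1: one pass recording the index of every pipe at depth zero.
--     brace = 0
--     paren = 0
--     cuts = []
--     for i, char in enumerate(cmd):
--         if char == "{":
--             brace += 1
--         elif char == "}":
--             brace -= 1
--         elif char == "(":
--             paren += 1
--         elif char == ")":
--             paren -= 1
--         if char == "|" and brace == 0 and paren == 0:
--             cuts.append(i)
--     # Phase 2: slice cmd between consecutive cut positions.
--     out = []
--     start = 0
--     for c in cuts:
--         out.append(cmd[start:c])
--         start = c + 1
--     out.append(cmd[start:])
--     return out
-- ===== Notes on version B (the rewrite author's own statement) =====
-- stated objective: alternative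
-- what changed: Replaces A's char-by-char accumulation with list stacks by a two-phase index-and-slice decomposition: one pass with integer depth counters records the positions of depth-zero pipes, then cmd is sliced between consecutive cut positions.
import Mathlib
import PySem

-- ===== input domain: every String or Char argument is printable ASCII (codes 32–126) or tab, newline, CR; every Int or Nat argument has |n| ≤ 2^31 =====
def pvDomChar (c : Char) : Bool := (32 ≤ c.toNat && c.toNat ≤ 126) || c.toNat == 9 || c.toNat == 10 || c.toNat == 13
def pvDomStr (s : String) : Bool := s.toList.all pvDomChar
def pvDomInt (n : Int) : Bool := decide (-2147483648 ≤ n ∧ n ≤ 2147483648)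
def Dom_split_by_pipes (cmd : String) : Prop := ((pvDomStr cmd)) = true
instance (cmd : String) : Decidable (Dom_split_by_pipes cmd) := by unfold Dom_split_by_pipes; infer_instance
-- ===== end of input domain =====

-- B replaces A's char-by-char accumulation by recording depth-zero pipe positions and
-- slicing the command between them (alternative decomposition, same cost).

-- ===== PORT A =====
-- state = (stack_brace, stack_paren, cmdlist, newcmd); strings handled as List Char.
-- Python's .pop() raises IndexError on an empty stack; here .tail [] = [] — exactly
-- those inputs are excluded by Pre_split_by_pipes.
def stepA (st : List Char × List Char × List (List Char) × List Char) (c : Char) :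
    List Char × List Char × List (List Char) × List Char :=
  let sb := if c = '{' then '{' :: st.1 else if c = '}' then st.1.tail else st.1
  let sp := if c = '(' then '(' :: st.2.1 else if c = ')' then st.2.1.tail else st.2.1
  if 0 < sb.length ∨ 0 < sp.length then (sb, sp, st.2.2.1, st.2.2.2 ++ [c])
  else if c = '|' then (sb, sp, st.2.2.1 ++ [st.2.2.2], [])
  else (sb, sp, st.2.2.1, st.2.2.2 ++ [c])

def split_by_pipes (cmd : String) : List String :=
  let st := cmd.toList.foldl stepA ([], [], [], [])
  (st.2.2.1 ++ [st.2.2.2]).map String.mk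

-- ===== PORT B =====
-- Phase 1: record the index of every '|' seen while both depth counters are zero.
def cutsGo (l : List Char) (i : Nat) (b p : Int) : List Nat :=
  match l with
  | [] => []
  | c :: cs =>
    let b' := if c = '{' then b + 1 else if c = '}' then b - 1 else b
    let p' := if c = '(' then p + 1 else if c = ')' then p - 1 else p
    if c = '|' ∧ b' = 0 ∧ p' = 0 then i :: cutsGo cs (i + 1) b' p'
    else cutsGo cs (i + 1) b' p'

-- Phase 2: cmd[start:c] for 0 ≤ start ≤ c ≤ len is take (c-start) ∘ drop start (exact here).
def slicesGo (l : List Char) (start : Nat) (cuts : List Nat) : List (List Char) :=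
  match cuts with
  | [] => [l.drop start]
  | c :: rest => ((l.drop start).take (c - start)) :: slicesGo l (c + 1) rest

def split_by_pipes_alt (cmd : String) : List String :=
  (slicesGo cmd.toList 0 (cutsGo cmd.toList 0 0 0)).map String.mk

-- ===== PRECONDITION & SPEC =====
-- Pre_ excludes exactly the inputs on which A raises IndexError: some prefix closes
-- a brace or a paren that was never opened (pop from an empty stack).
def Pre_split_by_pipes (cmd : String) : Prop :=
  ∀ q ∈ cmd.toList.inits, q.count '}' ≤ q.count '{' ∧ q.count ')' ≤ q.count '('
instance (cmd : String) : Decidable (Pre_split_by_pipes cmd) := by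
  unfold Pre_split_by_pipes; infer_instance

def pvWitness_split_by_pipes : String := "a|(b|{c|d})|e"

def Spec_split_by_pipes (cmd : String) (out : List String) : Prop := out = split_by_pipes_alt cmd
instance (cmd : String) (out : List String) : Decidable (Spec_split_by_pipes cmd out) := by unfold Spec_split_by_pipes; infer_instance

-- ===== CLAIM (what is proved, stated in full; the proofs are below) =====
def Claim_equal_split_by_pipes : Prop := ∀ (cmd : String), Dom_split_by_pipes cmd → Pre_split_by_pipes cmd → Spec_split_by_pipes cmd (split_by_pipes cmd)

-- ===== LEMMAS AND PROOFS =====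

-- apply f to the head only (the command currently being accumulated)
def mapHead (f : List Char → List Char) : List (List Char) → List (List Char)
  | [] => []
  | h :: t => f h :: t

-- the common reference: commands produced from suffix l at (Nat) depths b, p
def R : List Char → Nat → Nat → List (List Char)
  | [], _, _ => [[]]
  | c :: cs, b, p =>
    let b' := if c = '{' then b + 1 else if c = '}' then b - 1 else b
    let p' := if c = '(' then p + 1 else if c = ')' then p - 1 else p
    if 0 < b' ∨ 0 < p' then mapHead (c :: ·) (R cs b' p')
    else if c = '|' then [] :: R cs b' p'
    else mapHead (c :: ·) (R cs b' p')

theorem len_upd (c o cl : Char) (sb : List Char) :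
    (if c = o then o :: sb else if c = cl then sb.tail else sb).length
    = (if c = o then sb.length + 1 else if c = cl then sb.length - 1 else sb.length) := by
  split_ifs <;> simp

theorem key1 (X : List (List Char)) (nc : List Char) (c : Char) (cl : List (List Char)) :
    cl ++ mapHead (fun x => (nc ++ [c]) ++ x) X
    = cl ++ mapHead (fun x => nc ++ x) (mapHead (fun x => c :: x) X) := by
  cases X <;> simp [mapHead]

theorem key2 (X : List (List Char)) (nc : List Char) (cl : List (List Char)) :
    (cl ++ [nc]) ++ mapHead (fun x => [] ++ x) X
    = cl ++ mapHead (fun x => nc ++ x) ([] :: X) := by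
  cases X <;> simp [mapHead]

theorem A_fold (l : List Char) (sb sp : List Char) (cl : List (List Char)) (nc : List Char) :
    (l.foldl stepA (sb, sp, cl, nc)).2.2.1 ++ [(l.foldl stepA (sb, sp, cl, nc)).2.2.2]
    = cl ++ mapHead (fun x => nc ++ x) (R l sb.length sp.length) := by
  induction l generalizing sb sp cl nc with
  | nil => simp [R, mapHead]
  | cons c cs ih =>
    rw [List.foldl_cons, R]
    have hb := len_upd c '{' '}' sb
    have hp := len_upd c '(' ')' sp
    simp only [stepA]
    rw [← hb, ← hp]
    split_ifs <;> rw [ih] <;>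
      first
        | exact key1 _ _ _ _
        | exact key2 _ _ _

-- prefix balance as integers, and the invariant that no prefix of the suffix
-- drives either depth below zero
def cntB (q : List Char) : Int := (q.count '{' : Int) - q.count '}'
def cntP (q : List Char) : Int := (q.count '(' : Int) - q.count ')'
def Ok (l : List Char) (b p : Int) : Prop :=
  ∀ q ∈ l.inits, 0 ≤ b + cntB q ∧ 0 ≤ p + cntP q

theorem cntB_cons (c : Char) (q : List Char) :
    cntB (c :: q) = (if c = '{' then (1 : Int) else if c = '}' then -1 else 0) + cntB q := by
  by_cases h1 : c = '{' <;> by_cases h2 : c = '}' <;>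
    simp_all [cntB] <;> omega

theorem cntP_cons (c : Char) (q : List Char) :
    cntP (c :: q) = (if c = '(' then (1 : Int) else if c = ')' then -1 else 0) + cntP q := by
  by_cases h1 : c = '(' <;> by_cases h2 : c = ')' <;>
    simp_all [cntP] <;> omega

theorem mem_inits_cons (c : Char) (cs q : List Char) (h : q ∈ cs.inits) :
    c :: q ∈ (c :: cs).inits := by
  simp only [List.inits_cons, List.mem_cons, List.mem_map]
  exact Or.inr ⟨q, h, rfl⟩

theorem ok_step (c : Char) (cs : List Char) (b p : Int) (h : Ok (c :: cs) b p) :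
    Ok cs (if c = '{' then b + 1 else if c = '}' then b - 1 else b)
          (if c = '(' then p + 1 else if c = ')' then p - 1 else p) := by
  intro q hq
  have h2 := h (c :: q) (mem_inits_cons c cs q hq)
  rw [cntB_cons, cntP_cons] at h2
  constructor <;> split_ifs <;> split_ifs at h2 <;> omega

theorem ok_head (c : Char) (cs : List Char) (b p : Int) (h : Ok (c :: cs) b p) :
    0 ≤ (if c = '{' then b + 1 else if c = '}' then b - 1 else b) ∧
    0 ≤ (if c = '(' then p + 1 else if c = ')' then p - 1 else p) := by
  have h2 := h [c] (mem_inits_cons c cs [] (by simp))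
  rw [cntB_cons, cntP_cons] at h2
  simp [cntB, cntP] at h2
  constructor <;> split_ifs <;> split_ifs at h2 <;> omega

theorem cuts_ge (l : List Char) (i : Nat) (b p : Int) :
    ∀ x ∈ cutsGo l i b p, i ≤ x := by
  induction l generalizing i b p with
  | nil => simp [cutsGo]
  | cons c cs ih =>
    intro x hx
    rw [cutsGo] at hx
    split_ifs at hx <;>
      (try (rw [List.mem_cons] at hx; rcases hx with rfl | hx)) <;>
      (first | omega | (have := ih (i + 1) _ _ x hx; omega))

theorem drop_succ_of_drop (l0 : List Char) (i : Nat) (c : Char) (cs : List Char)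
    (h : l0.drop i = c :: cs) : l0.drop (i + 1) = cs := by
  rw [← List.drop_drop, h]
  rfl

theorem slices_cons (l0 : List Char) (i : Nat) (c : Char) (cs : List Char)
    (cuts : List Nat) (hd : l0.drop i = c :: cs) (hge : ∀ x ∈ cuts, i + 1 ≤ x) :
    slicesGo l0 i cuts = mapHead (fun x => c :: x) (slicesGo l0 (i + 1) cuts) := by
  cases cuts with
  | nil => simp [slicesGo, mapHead, hd, drop_succ_of_drop l0 i c cs hd]
  | cons k rest =>
    have hk : i + 1 ≤ k := hge k (by simp)
    simp only [slicesGo, mapHead, hd, drop_succ_of_drop l0 i c cs hd]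
    have : k - i = (k - (i + 1)) + 1 := by omega
    rw [this, List.take_succ_cons]

theorem B_main (l : List Char) (l0 : List Char) (i : Nat) (b p : Int)
    (hd : l0.drop i = l) (hb : 0 ≤ b) (hp : 0 ≤ p) (hok : Ok l b p) :
    slicesGo l0 i (cutsGo l i b p) = R l b.toNat p.toNat := by
  induction l generalizing i b p with
  | nil => simp [cutsGo, slicesGo, R, hd]
  | cons c cs ih =>
    have hhead := ok_head c cs b p hok
    have hok' := ok_step c cs b p hok
    have hd' := drop_succ_of_drop l0 i c cs hd
    rw [cutsGo, R]
    have hbN : (if c = '{' then b + 1 else if c = '}' then b - 1 else b).toNat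
        = (if c = '{' then b.toNat + 1 else if c = '}' then b.toNat - 1 else b.toNat) := by
      split_ifs <;> omega
    have hpN : (if c = '(' then p + 1 else if c = ')' then p - 1 else p).toNat
        = (if c = '(' then p.toNat + 1 else if c = ')' then p.toNat - 1 else p.toNat) := by
      split_ifs <;> omega
    rw [← hbN, ← hpN]
    set b' := (if c = '{' then b + 1 else if c = '}' then b - 1 else b) with hb'
    set p' := (if c = '(' then p + 1 else if c = ')' then p - 1 else p) with hp'
    by_cases hcut : c = '|' ∧ b' = 0 ∧ p' = 0
    · -- a depth-zero pipe: cut recorded at i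
      obtain ⟨hc, hb0, hp0⟩ := hcut
      have hR : ¬ (0 < b'.toNat ∨ 0 < p'.toNat) := by omega
      rw [if_pos ⟨hc, hb0, hp0⟩, if_neg hR, if_pos hc]
      simp only [slicesGo, Nat.sub_self, List.take_zero]
      rw [ih (i + 1) b' p' hd' hhead.1 hhead.2 hok']
    · -- no cut here: the char belongs to the current slice
      rw [if_neg hcut, slices_cons l0 i c cs _ hd (cuts_ge cs (i + 1) b' p'),
        ih (i + 1) b' p' hd' hhead.1 hhead.2 hok']
      by_cases hpos : 0 < b'.toNat ∨ 0 < p'.toNat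
      · rw [if_pos hpos]
      · rw [if_neg hpos]
        have hb0 : b' = 0 := by omega
        have hp0 : p' = 0 := by omega
        have hc : ¬ c = '|' := fun h => hcut ⟨h, hb0, hp0⟩
        rw [if_neg hc]

theorem split_by_pipes_spec : Claim_equal_split_by_pipes := by
  intro cmd _ hpre
  unfold Spec_split_by_pipes split_by_pipes split_by_pipes_alt
  have hok : Ok cmd.toList 0 0 := by
    intro q hq
    have := hpre q hq
    unfold cntB cntP
    constructor <;> omega
  have hB := B_main cmd.toList cmd.toList 0 0 0 (by simp) le_rfl le_rfl hok
  have hA := A_fold cmd.toList [] [] [] []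
  simp only [List.length_nil] at hA
  rw [hB]
  show List.map String.mk ((List.foldl stepA ([], [], [], []) cmd.toList).2.2.1
      ++ [(List.foldl stepA ([], [], [], []) cmd.toList).2.2.2]) = _
  rw [hA]
  simp only [Int.toNat_zero]
  cases R cmd.toList 0 0 <;> simp [mapHead]
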